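-- pv_equiv track=rewrite | github.com/TylerAnderton/Healthcare-Assistant | tests/test_meds_accuracy.py | _parse_timeline
-- ===== SOURCE A (Python) =====
-- def _parse_timeline(block: str):
--     by_med = {}
--     current_med = None
--     for raw in block.splitlines():
--         line = raw.rstrip("\n")
--         if line.startswith("- Drug: "):
--             current_med = line.split(": ", 1)[1].strip()
--             by_med.setdefault(current_med, [])
--         elif current_med and line.startswith("  - "):
--             by_med[current_med].append(line.strip())
--     return by_med
-- ===== SOURCE B (Python) =====
-- def _parse_timeline(block: str):
--     # phase 1: partition the lines into ordered (drug, sublines) sections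
--     sections = []
--     for line in block.splitlines():
--         if line.startswith("- Drug: "):
--             sections.append((line.split(": ", 1)[1].strip(), []))
--         elif sections and sections[-1][0] and line.startswith("  - "):
--             sections[-1][1].append(line.strip())
--     # phase 2: merge sections into a dict (repeated drug names extend the first entry)
--     by_med = {}
--     for med, subs in sections:
--         by_med.setdefault(med, []).extend(subs)
--     return by_med
-- ===== Notes on version B (the rewrite author's own statement) =====
-- stated objective: alternative
-- what changed: Replaces the interleaved current_med/dict bookkeeping with two phases: partition the lines into an ordered list of (drug, sublines) sections, then fold the sections into the dict with setdefault+extend so duplicate drug names merge.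
import Mathlib
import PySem

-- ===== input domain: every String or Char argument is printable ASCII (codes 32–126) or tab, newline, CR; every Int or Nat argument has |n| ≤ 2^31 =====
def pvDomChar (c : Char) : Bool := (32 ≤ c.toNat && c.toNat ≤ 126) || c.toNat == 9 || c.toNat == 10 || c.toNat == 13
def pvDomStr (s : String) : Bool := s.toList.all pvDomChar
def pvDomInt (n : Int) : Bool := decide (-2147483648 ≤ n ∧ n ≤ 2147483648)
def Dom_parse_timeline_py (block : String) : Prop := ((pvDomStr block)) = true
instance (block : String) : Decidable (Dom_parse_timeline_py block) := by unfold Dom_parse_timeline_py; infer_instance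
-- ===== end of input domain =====

-- B replaces A's interleaved current_med/dict bookkeeping by two phases — partition the
-- lines into ordered (drug, sublines) sections, then merge the sections into the dict —
-- same cost, different decomposition (objective: alternative).


-- ===== PORT A =====
-- raw.rstrip("\n"): exact hand port (drop trailing '\n' characters)
def pvLine (raw : String) : String :=
  String.ofList ((raw.toList.reverse.dropWhile (fun c => c == '\n')).reverse)

-- line.split(": ", 1)[1].strip(); used only when line starts with "- Drug: ", so
-- the split has ≥ 2 parts and index 1 is in range (getD is exact there)
def pvDrugName (line : String) : String :=
  PySem.Str.strip (((PySem.Str.splitMax? line ": " 1).getD []).getD 1 "")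

-- one iteration of A's loop; state = (by_med, current_med)
def pvStepA (st : PySem.Dict String (List String) × Option String) (raw : String) :
    PySem.Dict String (List String) × Option String :=
  let line := pvLine raw
  if PySem.Str.startswith line "- Drug: " then
    let m := pvDrugName line
    (st.1.setdefault m [], some m)
  else
    match st.2 with
    | some m =>
      -- `current_med and …`: the empty drug name is falsy in Python
      if m ≠ "" ∧ PySem.Str.startswith line "  - " then
        -- by_med[current_med].append(line.strip()): the key m is always present
        -- (setdefault ran when m became current), so modify is exact here
        (st.1.modify m [] (fun v => v ++ [PySem.Str.strip line]), some m)
      else (st.1, some m)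
    | none => (st.1, none)

def parse_timeline_py (block : String) : List (String × List String) :=
  (((PySem.Str.splitlines block).foldl pvStepA (PySem.Dict.empty, none)).1).items

-- ===== PORT B =====
-- one iteration of B's phase-1 loop over the sections list
def pvStepB (secs : List (String × List String)) (line : String) :
    List (String × List String) :=
  if PySem.Str.startswith line "- Drug: " then
    secs ++ [(pvDrugName line, [])]
  else
    match secs.getLast? with
    | some last =>
      if last.1 ≠ "" ∧ PySem.Str.startswith line "  - " then
        secs.dropLast ++ [(last.1, last.2 ++ [PySem.Str.strip line])]
      else secs
    | none => secs

-- one iteration of B's phase-2 loop: by_med.setdefault(med, []).extend(subs)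
def pvStepM (d : PySem.Dict String (List String)) (p : String × List String) :
    PySem.Dict String (List String) :=
  d.modify p.1 [] (fun v => v ++ p.2)

def parse_timeline_py_alt (block : String) : List (String × List String) :=
  let sections := (PySem.Str.splitlines block).foldl pvStepB []
  (sections.foldl pvStepM PySem.Dict.empty).items

-- ===== PRECONDITION & SPEC =====
def Spec_parse_timeline_py (block : String) (out : List (String × List String)) : Prop := out = parse_timeline_py_alt block
instance (block : String) (out : List (String × List String)) : Decidable (Spec_parse_timeline_py block out) := by unfold Spec_parse_timeline_py; infer_instance

-- ===== CLAIM (what is proved, stated in full; the proofs are below) =====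
def Claim_equal_parse_timeline_py : Prop := ∀ (block : String), Dom_parse_timeline_py block → Spec_parse_timeline_py block (parse_timeline_py block)

-- ===== LEMMAS AND PROOFS =====

-- merge of B's phase 2 starting from the empty dict
def pvMerge (secs : List (String × List String)) : PySem.Dict String (List String) :=
  secs.foldl pvStepM PySem.Dict.empty

-- relation between A's current_med and B's sections list
def pvRel (cur : Option String) (secs : List (String × List String)) : Prop :=
  match cur with
  | none => secs = []
  | some m => ∃ rest subs, secs = rest ++ [(m, subs)]

theorem pv_go_cons (isB : Char → Bool) (c0 : Char) (rest cur : List Char)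
    (acc : List (List Char))
    (hne : ∀ r1, c0 = '\x0d' → rest = '\n' :: r1 → False) :
    PySem.Chars.splitlines.go isB (c0 :: rest) cur acc
      = if isB c0 then PySem.Chars.splitlines.go isB rest [] (cur.reverse :: acc)
        else PySem.Chars.splitlines.go isB rest (c0 :: cur) acc := by
  rw [PySem.Chars.splitlines.go.eq_def]
  split
  · rename_i heq; simp at heq
  · rename_i r1 heq
    injection heq with h1 h2
    exact (hne r1 h1 h2).elim
  · rename_i c r hne' heq
    injection heq with h1 h2
    subst h1; subst h2
    rfl

theorem pv_no_break (isB : Char → Bool) :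
    ∀ (s cur : List Char) (acc : List (List Char)),
      (∀ c ∈ cur, isB c = false) →
      (∀ l ∈ acc, ∀ c ∈ l, isB c = false) →
      ∀ l ∈ PySem.Chars.splitlines.go isB s cur acc, ∀ c ∈ l, isB c = false := by
  intro s cur acc
  induction s, cur, acc using PySem.Chars.splitlines.go.induct (isB := isB) with
  | case1 cur acc h =>
    intro hcur hacc l hl c hc
    rw [PySem.Chars.splitlines.go.eq_def] at hl
    simp [h] at hl
    exact hacc l hl c hc
  | case2 cur acc h =>
    intro hcur hacc l hl c hc
    rw [PySem.Chars.splitlines.go.eq_def] at hl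
    simp [h] at hl
    rcases hl with hl | hl
    · exact hacc l hl c hc
    · subst hl; exact hcur c (List.mem_reverse.mp hc)
  | case3 rest cur acc ih =>
    intro hcur hacc l hl c hc
    rw [show PySem.Chars.splitlines.go isB ('\x0d' :: '\n' :: rest) cur acc
          = PySem.Chars.splitlines.go isB rest [] (cur.reverse :: acc) by
        simp [PySem.Chars.splitlines.go]] at hl
    refine ih (by simp) ?_ l hl c hc
    intro l' hl' c' hc'
    rcases List.mem_cons.mp hl' with h' | h'
    · subst h'; exact hcur c' (List.mem_reverse.mp hc')
    · exact hacc l' h' c' hc'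
  | case4 c0 rest cur acc hne hb ih =>
    intro hcur hacc l hl c hc
    rw [pv_go_cons isB c0 rest cur acc (fun r1 h1 h2 => hne r1 h1 h2), if_pos hb] at hl
    refine ih (by simp) ?_ l hl c hc
    intro l' hl' c' hc'
    rcases List.mem_cons.mp hl' with h' | h'
    · subst h'; exact hcur c' (List.mem_reverse.mp hc')
    · exact hacc l' h' c' hc'
  | case5 c0 rest cur acc hne hb ih =>
    intro hcur hacc l hl c hc
    rw [pv_go_cons isB c0 rest cur acc (fun r1 h1 h2 => hne r1 h1 h2),
        if_neg hb] at hl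
    refine ih ?_ hacc l hl c hc
    intro c' hc'
    rcases List.mem_cons.mp hc' with h' | h'
    · subst h'; exact Bool.eq_false_iff.mpr hb
    · exact hcur c' h'

theorem pvLine_splitlines (block : String) :
    ∀ l ∈ PySem.Str.splitlines block, pvLine l = l := by
  intro l hl
  rw [PySem.Str.splitlines] at hl
  obtain ⟨cs, hcs, rfl⟩ := List.mem_map.mp hl
  rw [PySem.Chars.splitlines] at hcs
  have hnb := pv_no_break _ block.toList [] [] (by simp) (by simp) cs hcs
  have hdw : cs.reverse.dropWhile (fun c => c == '\n') = cs.reverse := by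
    cases h : cs.reverse with
    | nil => rfl
    | cons a t =>
      rw [List.dropWhile_cons_of_neg]
      have ha : a ∈ cs := List.mem_reverse.mp (by rw [h]; exact List.mem_cons_self)
      have := hnb a ha
      simp only [beq_iff_eq]
      intro hEq
      rw [hEq] at this
      simp at this
  rw [pvLine]
  have htl : (String.ofList cs).toList = cs := by simp
  rw [htl, hdw, List.reverse_reverse]

theorem pvMerge_snoc (secs : List (String × List String)) (p : String × List String) :
    pvMerge (secs ++ [p]) = pvStepM (pvMerge secs) p := by
  simp [pvMerge]

theorem pv_nodup_merge (secs : List (String × List String)) : (pvMerge secs).keys.Nodup := by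
  have h := PySem.Dict.nodup_keys_foldl_modify_key secs Prod.fst []
      (fun _ p => fun v => v ++ p.2) PySem.Dict.empty (by simp)
  simpa [pvMerge, pvStepM] using h

theorem pv_modify_setdefault (d : PySem.Dict String (List String)) (m : String)
    (hnd : d.keys.Nodup) :
    d.modify m [] (fun v => v ++ []) = d.setdefault m [] := by
  by_cases hc : d.contains m = true
  · rw [PySem.Dict.setdefault_of_contains d [] hc]
    apply PySem.Dict.ext
    rw [show d.modify m [] (fun v => v ++ []) = d.insert m (d.getD m []) by
      simp [PySem.Dict.modify]]
    rw [PySem.Dict.items_insert_of_contains d (d.getD m []) hc]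
    conv_rhs => rw [← List.map_id d.items]
    apply List.map_congr_left
    intro p hp
    by_cases hpm : (p.1 == m) = true
    · have hme : m = p.1 := ((beq_iff_eq).mp hpm).symm
      have hval : d.getD p.1 [] = p.2 := PySem.Dict.getD_of_mem_items d (by simpa using hp) hnd []
      simp only [hpm, if_pos]
      rw [hme, hval]
      simp
    · simp [hpm]
  · have hc' : d.contains m = false := by simpa using hc
    rw [PySem.Dict.setdefault_of_not_contains d [] hc']
    simp [PySem.Dict.modify, PySem.Dict.getD_of_not_contains d [] hc']

theorem pv_modify_modify (d : PySem.Dict String (List String)) (m : String)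
    (subs : List String) (x : String) :
    (d.modify m [] (fun v => v ++ subs)).modify m [] (fun v => v ++ [x])
      = d.modify m [] (fun v => v ++ (subs ++ [x])) := by
  simp [PySem.Dict.modify, PySem.Dict.insert_insert_self, PySem.Dict.getD_insert_self,
    List.append_assoc]

theorem pv_loop (lines : List String) :
    ∀ (cur : Option String) (secs : List (String × List String)),
      (∀ l ∈ lines, pvLine l = l) →
      pvRel cur secs →
      (lines.foldl pvStepA (pvMerge secs, cur)).1
        = pvMerge (lines.foldl pvStepB secs) := by
  induction lines with
  | nil => intro cur secs _ _; simp
  | cons raw rest ih =>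
    intro cur secs hl hrel
    have hraw : pvLine raw = raw := hl raw List.mem_cons_self
    have hrest : ∀ l ∈ rest, pvLine l = l := fun l h => hl l (List.mem_cons_of_mem _ h)
    simp only [List.foldl_cons]
    by_cases hH : PySem.Str.startswith raw "- Drug: " = true
    · have hA : pvStepA (pvMerge secs, cur) raw
          = (pvMerge (secs ++ [(pvDrugName raw, [])]), some (pvDrugName raw)) := by
        rw [pvMerge_snoc]
        simp only [pvStepA, pvStepM, hraw]
        rw [if_pos hH, pv_modify_setdefault _ _ (pv_nodup_merge secs)]
      have hB : pvStepB secs raw = secs ++ [(pvDrugName raw, [])] := by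
        simp only [pvStepB]
        rw [if_pos hH]
      rw [hA, hB]
      exact ih _ _ hrest ⟨secs, [], rfl⟩
    · cases cur with
      | none =>
        have hsecs : secs = [] := hrel
        subst hsecs
        have hA : pvStepA (pvMerge [], none) raw = (pvMerge [], none) := by
          simp only [pvStepA, hraw]
          rw [if_neg hH]
        have hB : pvStepB [] raw = [] := by
          simp only [pvStepB]
          rw [if_neg hH]
          rfl
        rw [hA, hB]
        exact ih _ _ hrest rfl
      | some m =>
        obtain ⟨rest0, subs, rfl⟩ := hrel
        by_cases hc : m ≠ "" ∧ PySem.Str.startswith raw "  - " = true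
        · have hA : pvStepA (pvMerge (rest0 ++ [(m, subs)]), some m) raw
              = (pvMerge (rest0 ++ [(m, subs ++ [PySem.Str.strip raw])]), some m) := by
            rw [pvMerge_snoc, pvMerge_snoc]
            simp only [pvStepA, pvStepM, hraw]
            rw [if_neg hH, if_pos hc, pv_modify_modify]
          have hB : pvStepB (rest0 ++ [(m, subs)]) raw
              = rest0 ++ [(m, subs ++ [PySem.Str.strip raw])] := by
            simp only [pvStepB, List.getLast?_concat, List.dropLast_concat]
            rw [if_neg hH, if_pos hc]
          rw [hA, hB]
          exact ih _ _ hrest ⟨rest0, subs ++ [PySem.Str.strip raw], rfl⟩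
        · have hA : pvStepA (pvMerge (rest0 ++ [(m, subs)]), some m) raw
              = (pvMerge (rest0 ++ [(m, subs)]), some m) := by
            simp only [pvStepA, hraw]
            rw [if_neg hH, if_neg hc]
          have hB : pvStepB (rest0 ++ [(m, subs)]) raw = rest0 ++ [(m, subs)] := by
            simp only [pvStepB, List.getLast?_concat]
            rw [if_neg hH, if_neg hc]
          rw [hA, hB]
          exact ih _ _ hrest ⟨rest0, subs, rfl⟩

-- ===== VERDICT (by name: the statement is the Claim_ definition above) =====
theorem parse_timeline_py_spec : Claim_equal_parse_timeline_py := by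
  intro block _
  unfold Spec_parse_timeline_py parse_timeline_py parse_timeline_py_alt
  have h := pv_loop (PySem.Str.splitlines block) none [] (pvLine_splitlines block) (by simp [pvRel])
  simpa [pvMerge] using congrArg PySem.Dict.items h
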